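-- pv_equiv track=rewrite | github.com/SamirPaulb/DSAlgo | 22_Math/27. Vus the Cossack and Strings.py | solve
-- ===== SOURCE A (Python) =====
-- def solve(a, b):
--
--     len_a = len(a)
--     len_b = len(b)
--
--     bits_xored_subarr_a = 0
--     bits_xored_b = 0
--
--     # b and first sub-array of a
--     for i in range(0, len_b):
--         if a[i] == '1':
--             bits_xored_subarr_a ^= 1
--         if b[i] == '1':
--             bits_xored_b ^= 1
--
--     count = 0
--
--     # inner sub-arrays of a
--     for i in range(len_b, len_a):
--         if bits_xored_subarr_a == bits_xored_b:
--             count += 1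
--         if a[i] == '1':
--             bits_xored_subarr_a ^= 1
--         if a[i - len_b] == '1':
--             bits_xored_subarr_a ^= 1
--
--     # for the last sub-array of a
--     if bits_xored_subarr_a == bits_xored_b:
--         count += 1
--
--     return count
-- ===== SOURCE B (Python) =====
-- def solve(a, b):
--     prefix = [0]
--     p = 0
--     for ch in a:
--         p ^= 1 if ch == '1' else 0
--         prefix.append(p)
--     target = 0
--     for ch in b:
--         target ^= 1 if ch == '1' else 0
--     m = len(b)
--     count = 0
--     for i in range(len(a) - m + 1):
--         if prefix[i] ^ prefix[i + m] == target:
--             count += 1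
--     return count
-- ===== Notes on version B (the rewrite author's own statement) =====
-- stated objective: alternative
-- what changed: B precomputes a prefix-parity table of a and a target parity of b, then counts windows by XOR-ing two table entries, instead of A's incremental sliding-window XOR update.
import Mathlib
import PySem

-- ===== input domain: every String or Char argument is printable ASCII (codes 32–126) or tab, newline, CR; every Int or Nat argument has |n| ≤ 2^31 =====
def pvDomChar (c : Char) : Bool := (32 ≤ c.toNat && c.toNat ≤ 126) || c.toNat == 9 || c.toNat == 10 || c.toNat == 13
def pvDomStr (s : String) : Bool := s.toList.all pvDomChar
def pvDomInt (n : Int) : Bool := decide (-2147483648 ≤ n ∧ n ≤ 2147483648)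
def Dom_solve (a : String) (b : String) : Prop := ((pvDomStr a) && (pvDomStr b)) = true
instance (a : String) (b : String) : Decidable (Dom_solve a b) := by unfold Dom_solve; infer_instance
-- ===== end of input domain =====

-- B replaces A's sliding-window XOR update by a prefix-parity table (alternative decomposition, same O(n) cost).
-- ===== PORT A =====
def solve (a : String) (b : String) : Int :=
  let la := a.toList
  let lb := b.toList
  let lenA : Int := la.length
  let lenB : Int := lb.length
  let s1 := (PySem.List.pyRange 0 lenB 1).foldl
    (fun (st : Int × Int) i =>
      let x := if PySem.List.pyGetD la i ' ' = '1' then Int.xor st.1 1 else st.1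
      let y := if PySem.List.pyGetD lb i ' ' = '1' then Int.xor st.2 1 else st.2
      (x, y)) (0, 0)
  let s2 := (PySem.List.pyRange lenB lenA 1).foldl
    (fun (st : Int × Int) i =>
      let c := if st.1 = s1.2 then st.2 + 1 else st.2
      let x1 := if PySem.List.pyGetD la i ' ' = '1' then Int.xor st.1 1 else st.1
      let x2 := if PySem.List.pyGetD la (i - lenB) ' ' = '1' then Int.xor x1 1 else x1
      (x2, c)) (s1.1, 0)
  if s2.1 = s1.2 then s2.2 + 1 else s2.2

-- ===== PORT B =====
def solve_alt (a : String) (b : String) : Int :=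
  let la := a.toList
  let lb := b.toList
  let pre :=
    (la.foldl (fun (st : List Int × Int) ch =>
      let p := Int.xor st.2 (if ch = '1' then (1:Int) else 0)
      (st.1 ++ [p], p)) ([0], 0)).1
  let target := lb.foldl (fun (t : Int) ch => Int.xor t (if ch = '1' then (1:Int) else 0)) 0
  let m : Int := lb.length
  (PySem.List.pyRange 0 ((la.length : Int) - m + 1) 1).foldl
    (fun (c : Int) i =>
      if Int.xor (PySem.List.pyGetD pre i 0) (PySem.List.pyGetD pre (i + m) 0) = target
      then c + 1 else c) 0

-- ===== PRECONDITION & SPEC =====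
-- Pre_ excludes exactly the inputs where A raises IndexError (len(b) > len(a)); there B returns 0.
def Pre_solve (a : String) (b : String) : Prop := b.toList.length ≤ a.toList.length
instance (a : String) (b : String) : Decidable (Pre_solve a b) := by unfold Pre_solve; infer_instance
def pvWitness_solve : String × String := ("0110", "10")


def Spec_solve (a : String) (b : String) (out : Int) : Prop := out = solve_alt a b
instance (a : String) (b : String) (out : Int) : Decidable (Spec_solve a b out) := by unfold Spec_solve; infer_instance

-- ===== CLAIM (what is proved, stated in full; the proofs are below) =====
def Claim_equal_solve : Prop := ∀ (a : String) (b : String), Dom_solve a b → Pre_solve a b → Spec_solve a b (solve a b)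

-- ===== LEMMAS AND PROOFS =====

/-- 0/1 encoding of a parity bit. -/
def ib (p : Bool) : Int := if p then 1 else 0

/-- Parity of the '1'-characters of a list. -/
def bpar : List Char → Bool
  | [] => false
  | c :: l => xor (c == '1') (bpar l)

/-- Parity of ones in the first `k` characters. -/
def pfx (la : List Char) (k : Nat) : Bool := bpar (la.take k)

/-- Parity of the window of length `m` starting at `j`, via two prefixes. -/
def wb (la : List Char) (m j : Nat) : Bool := xor (pfx la j) (pfx la (j + m))

/-- Count (as Int) of indices j ∈ [lo, lo+len) with f j true. -/
def cnt (f : Nat → Bool) (lo len : Nat) : Int :=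
  match len with
  | 0 => 0
  | len + 1 => (if f lo then 1 else 0) + cnt f (lo + 1) len

theorem bpar_append (l1 l2 : List Char) : bpar (l1 ++ l2) = xor (bpar l1) (bpar l2) := by
  induction l1 with
  | nil => simp [bpar]
  | cons c l ih => simp [bpar, ih]

theorem ib_inj (p q : Bool) : (ib p = ib q) ↔ p = q := by cases p <;> cases q <;> simp [ib]

theorem ib_xor_bit (s : Bool) (c : Char) :
    Int.xor (ib s) (if c = '1' then 1 else 0) = ib (xor s (c == '1')) := by
  by_cases h : c = '1' <;> cases s <;> simp [h, ib] <;> decide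

theorem ib_step (s : Bool) (c : Char) :
    (if c = '1' then Int.xor (ib s) 1 else ib s) = ib (xor s (c == '1')) := by
  by_cases h : c = '1' <;> cases s <;> simp [h, ib] <;> decide

theorem ib_xor_ib (p q : Bool) : Int.xor (ib p) (ib q) = ib (xor p q) := by
  cases p <;> cases q <;> simp [ib] <;> decide

theorem pfx_succ (la : List Char) (k : Nat) (h : k < la.length) :
    pfx la (k + 1) = xor (pfx la k) (la[k] == '1') := by
  have h1 : la.take (k + 1) = la.take k ++ [la[k]] := by
    rw [List.take_add_one, List.getElem?_eq_getElem h]; rfl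
  rw [pfx, pfx, h1, bpar_append]
  simp [bpar]

theorem cnt_succ_right (f : Nat → Bool) (lo len : Nat) :
    cnt f lo (len + 1) = cnt f lo len + (if f (lo + len) then 1 else 0) := by
  induction len generalizing lo with
  | zero => simp [cnt]
  | succ n ih =>
    rw [cnt, ih (lo + 1), cnt]
    have h : lo + 1 + n = lo + (n + 1) := by omega
    rw [h]; ring

theorem pfx_all (l : List Char) : pfx l l.length = bpar l := by
  rw [pfx, List.take_length]

theorem wb_zero (la : List Char) (m : Nat) : wb la m 0 = pfx la m := by
  simp [wb, pfx, bpar]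

theorem wb_succ (la : List Char) (m j : Nat) (h : j + m < la.length) :
    wb la m (j + 1) = xor (xor (wb la m j) (la[j + m] == '1')) (la[j] == '1') := by
  have h2 : j + 1 + m = (j + m) + 1 := by omega
  rw [wb, wb, h2, pfx_succ la j (by omega), pfx_succ la (j + m) h]
  generalize pfx la j = p
  generalize pfx la (j + m) = q
  generalize (la[j] == '1') = u
  generalize (la[j + m] == '1') = v
  cases p <;> cases q <;> cases u <;> cases v <;> rfl

theorem loopA1 (la lb : List Char) (hm : lb.length ≤ la.length) :
    ∀ (n k : Nat), k ≤ lb.length → lb.length - k = n →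
    (PySem.List.pyRange (k : Int) ((lb.length : Nat) : Int) 1).foldl
      (fun (st : Int × Int) i =>
        (if PySem.List.pyGetD la i ' ' = '1' then Int.xor st.1 1 else st.1,
         if PySem.List.pyGetD lb i ' ' = '1' then Int.xor st.2 1 else st.2))
      (ib (pfx la k), ib (pfx lb k))
      = (ib (pfx la lb.length), ib (pfx lb lb.length)) := by
  intro n
  induction n with
  | zero =>
    intro k hk h0
    have hke : k = lb.length := by omega
    subst hke
    rw [PySem.List.pyRange_one_eq_nil (by omega)]
    rfl
  | succ n ih =>
    intro k hk h
    have hklt : k < lb.length := by omega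
    rw [PySem.List.pyRange_one_cons (by exact_mod_cast hklt), List.foldl_cons]
    have ha : PySem.List.pyGetD la ((k : Nat) : Int) ' ' = la[k]'(by omega) := by
      rw [PySem.List.pyGetD_natCast, List.getD_eq_getElem _ _ (by omega)]
    have hb : PySem.List.pyGetD lb ((k : Nat) : Int) ' ' = lb[k]'(by omega) := by
      rw [PySem.List.pyGetD_natCast, List.getD_eq_getElem _ _ (by omega)]
    rw [show ((k : Nat) : Int) + 1 = (((k + 1 : Nat)) : Int) by push_cast; ring]
    dsimp only
    rw [ha, hb, ib_step, ib_step, ← pfx_succ la k (by omega), ← pfx_succ lb k (by omega)]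
    exact ih (k + 1) (by omega) (by omega)

theorem loopA2 (la : List Char) (m : Nat) (t : Bool) (_hm : m ≤ la.length) :
    ∀ (n k : Nat) (c : Int), m ≤ k → k ≤ la.length → la.length - k = n →
    (PySem.List.pyRange (k : Int) ((la.length : Nat) : Int) 1).foldl
      (fun (st : Int × Int) i =>
        (if PySem.List.pyGetD la (i - ((m : Nat) : Int)) ' ' = '1' then
           Int.xor (if PySem.List.pyGetD la i ' ' = '1' then Int.xor st.1 1 else st.1) 1
         else (if PySem.List.pyGetD la i ' ' = '1' then Int.xor st.1 1 else st.1),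
         if st.1 = ib t then st.2 + 1 else st.2))
      (ib (wb la m (k - m)), c)
      = (ib (wb la m (la.length - m)),
         c + cnt (fun j => wb la m j == t) (k - m) (la.length - k)) := by
  intro n
  induction n with
  | zero =>
    intro k c hmk hk h0
    have hke : k = la.length := by omega
    rw [PySem.List.pyRange_one_eq_nil (by omega)]
    subst hke
    simp [cnt]
  | succ n ih =>
    intro k c hmk hk h
    have hklt : k < la.length := by omega
    rw [PySem.List.pyRange_one_cons (by exact_mod_cast hklt), List.foldl_cons]
    have ha : PySem.List.pyGetD la ((k : Nat) : Int) ' ' = la[k]'(by omega) := by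
      rw [PySem.List.pyGetD_natCast, List.getD_eq_getElem _ _ (by omega)]
    have hsub : ((k : Nat) : Int) - ((m : Nat) : Int) = (((k - m : Nat)) : Int) := by
      push_cast [Nat.cast_sub hmk]; ring
    have ha2 : PySem.List.pyGetD la ((((k - m : Nat)) : Int)) ' ' = la[k - m]'(by omega) := by
      rw [PySem.List.pyGetD_natCast, List.getD_eq_getElem _ _ (by omega)]
    rw [show ((k : Nat) : Int) + 1 = (((k + 1 : Nat)) : Int) by push_cast; ring]
    dsimp only
    rw [hsub, ha, ha2, ib_step, ib_step]
    have hwin : xor (xor (wb la m (k - m)) (la[k]'(by omega) == '1')) (la[k - m]'(by omega) == '1')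
        = wb la m ((k + 1) - m) := by
      have h1 : (k - m) + m = k := by omega
      have h2 : (k + 1) - m = (k - m) + 1 := by omega
      rw [h2, wb_succ la m (k - m) (by omega)]
      simp only [h1]
    rw [hwin]
    have hc : (if ib (wb la m (k - m)) = ib t then c + 1 else c)
        = c + (if wb la m (k - m) == t then 1 else 0) := by
      by_cases hw : wb la m (k - m) = t
      · simp [hw]
      · have hne : ib (wb la m (k - m)) ≠ ib t := by rw [Ne, ib_inj]; exact hw
        simp [hw, hne]
    rw [hc, ih (k + 1) _ (by omega) (by omega) (by omega)]
    have hcnt : cnt (fun j => wb la m j == t) (k - m) (la.length - k)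
        = (if wb la m (k - m) == t then 1 else 0)
          + cnt (fun j => wb la m j == t) ((k + 1) - m) (la.length - (k + 1)) := by
      have hlen : la.length - k = (la.length - (k + 1)) + 1 := by omega
      rw [hlen, cnt]
      have : (k - m) + 1 = (k + 1) - m := by omega
      rw [this]
    rw [hcnt, Prod.mk.injEq]
    exact ⟨rfl, by ring⟩

theorem buildP (la : List Char) : ∀ (acc : List Int) (s : Bool),
    (la.foldl (fun (st : List Int × Int) ch =>
        (st.1 ++ [Int.xor st.2 (if ch = '1' then (1:Int) else 0)],
         Int.xor st.2 (if ch = '1' then (1:Int) else 0)))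
      (acc, ib s))
    = (acc ++ (List.range la.length).map (fun k => ib (xor s (bpar (la.take (k + 1))))),
       ib (xor s (bpar la))) := by
  induction la with
  | nil => intro acc s; simp [bpar]
  | cons ch l ih =>
    intro acc s
    rw [List.foldl_cons]
    dsimp only
    rw [ib_xor_bit, ih (acc ++ [ib (xor s (ch == '1'))]) (xor s (ch == '1'))]
    rw [Prod.mk.injEq]
    refine ⟨?_, ?_⟩
    · rw [List.length_cons, List.range_succ_eq_map, List.map_cons, List.map_map]
      rw [List.append_assoc, List.singleton_append]
      congr 1
      · simp [bpar]
    · simp [bpar]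

theorem P_char (la : List Char) :
    (la.foldl (fun (st : List Int × Int) ch =>
        (st.1 ++ [Int.xor st.2 (if ch = '1' then (1:Int) else 0)],
         Int.xor st.2 (if ch = '1' then (1:Int) else 0)))
      ([0], 0)).1
    = (List.range (la.length + 1)).map (fun k => ib (pfx la k)) := by
  have h := buildP la [0] false
  rw [show (ib false) = (0 : Int) from rfl] at h
  rw [h]
  rw [List.range_succ_eq_map, List.map_cons, List.map_map]
  simp only [List.singleton_append]
  congr 1
  exact List.map_congr_left (fun k _ => by simp [pfx, Function.comp])

theorem P_get (la : List Char) (i : Nat) (h : i ≤ la.length) :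
    PySem.List.pyGetD ((List.range (la.length + 1)).map (fun k => ib (pfx la k))) ((i : Nat) : Int) 0
      = ib (pfx la i) := by
  rw [PySem.List.pyGetD_natCast, List.getD_eq_getElem _ _ (by simp; omega)]
  simp

theorem targetP (l : List Char) : ∀ (s : Bool),
    l.foldl (fun (t : Int) ch => Int.xor t (if ch = '1' then (1:Int) else 0)) (ib s)
      = ib (xor s (bpar l)) := by
  induction l with
  | nil => intro s; simp [bpar]
  | cons c l ih =>
    intro s
    rw [List.foldl_cons, ib_xor_bit, ih (xor s (c == '1'))]
    simp [bpar]

theorem loopB (la : List Char) (m : Nat) (t : Bool) (hm : m ≤ la.length)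
    (P : List Int) (hP : ∀ (i : Nat), i ≤ la.length → PySem.List.pyGetD P ((i : Nat) : Int) 0 = ib (pfx la i)) :
    ∀ (n k : Nat) (c : Int), k ≤ la.length - m + 1 → (la.length - m + 1) - k = n →
    (PySem.List.pyRange (k : Int) (((la.length : Nat) : Int) - ((m : Nat) : Int) + 1) 1).foldl
      (fun (c : Int) i =>
        if Int.xor (PySem.List.pyGetD P i 0) (PySem.List.pyGetD P (i + ((m : Nat) : Int)) 0) = ib t
        then c + 1 else c) c
    = c + cnt (fun j => wb la m j == t) k ((la.length - m + 1) - k) := by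
  intro n
  induction n with
  | zero =>
    intro k c hk h0
    rw [PySem.List.pyRange_one_eq_nil (by omega)]
    rw [h0]
    simp [cnt]
  | succ n ih =>
    intro k c hk h
    have hklt : k < la.length - m + 1 := by omega
    rw [PySem.List.pyRange_one_cons (by omega), List.foldl_cons]
    have hadd : ((k : Nat) : Int) + ((m : Nat) : Int) = (((k + m : Nat)) : Int) := by push_cast; ring
    rw [hadd, hP k (by omega), hP (k + m) (by omega), ib_xor_ib]
    rw [show ((k : Nat) : Int) + 1 = (((k + 1 : Nat)) : Int) by push_cast; ring]
    rw [ih (k + 1) _ (by omega) (by omega)]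
    have hc : (if ib (xor (pfx la k) (pfx la (k + m))) = ib t then c + 1 else c)
        = c + (if wb la m k == t then 1 else 0) := by
      have hwk : xor (pfx la k) (pfx la (k + m)) = wb la m k := rfl
      by_cases hw : wb la m k = t
      · simp [hwk, hw]
      · have hne : ib (xor (pfx la k) (pfx la (k + m))) ≠ ib t := by
          rw [hwk, Ne, ib_inj]; exact hw
        simp [hw, hne]
    rw [hc]
    have hcnt : cnt (fun j => wb la m j == t) k ((la.length - m + 1) - k)
        = (if wb la m k == t then 1 else 0)
          + cnt (fun j => wb la m j == t) (k + 1) ((la.length - m + 1) - (k + 1)) := by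
      have hlen : (la.length - m + 1) - k = ((la.length - m + 1) - (k + 1)) + 1 := by omega
      rw [hlen, cnt]
    rw [hcnt]
    ring

theorem solve_spec : Claim_equal_solve := by
  intro a b _ hpre
  unfold Pre_solve at hpre
  unfold Spec_solve solve solve_alt
  dsimp only
  have h1 : (PySem.List.pyRange 0 ((b.toList.length : Nat) : Int) 1).foldl
      (fun (st : Int × Int) i =>
        (if PySem.List.pyGetD a.toList i ' ' = '1' then Int.xor st.1 1 else st.1,
         if PySem.List.pyGetD b.toList i ' ' = '1' then Int.xor st.2 1 else st.2))
      (0, 0)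
      = (ib (pfx a.toList b.toList.length), ib (bpar b.toList)) := by
    have h := loopA1 a.toList b.toList hpre b.toList.length 0 (by omega) (by omega)
    rw [show (((0 : Nat)) : Int) = (0 : Int) from rfl] at h
    rw [show (ib (pfx a.toList 0), ib (pfx b.toList 0)) = ((0 : Int), (0 : Int)) from rfl] at h
    rw [h, pfx_all]
  rw [h1]
  dsimp only
  have hw0 : ib (pfx a.toList b.toList.length)
      = ib (wb a.toList b.toList.length (b.toList.length - b.toList.length)) := by
    rw [Nat.sub_self, wb_zero]
  rw [hw0]
  rw [loopA2 a.toList b.toList.length (bpar b.toList) hpre (a.toList.length - b.toList.length)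
      b.toList.length 0 (le_refl _) hpre rfl]
  dsimp only
  have ht : b.toList.foldl (fun (t : Int) ch => Int.xor t (if ch = '1' then (1:Int) else 0)) 0
      = ib (bpar b.toList) := by
    have h := targetP b.toList false
    rw [show (ib false) = (0 : Int) from rfl] at h
    rw [h]
    simp
  rw [ht, P_char]
  have h3 := loopB a.toList b.toList.length (bpar b.toList) hpre
      ((List.range (a.toList.length + 1)).map (fun k => ib (pfx a.toList k)))
      (fun i hi => P_get a.toList i hi)
      (a.toList.length - b.toList.length + 1) 0 0 (by omega) (by omega)
  rw [show (((0 : Nat)) : Int) = (0 : Int) from rfl] at h3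
  rw [h3]
  have hc : (if ib (wb a.toList b.toList.length (a.toList.length - b.toList.length))
        = ib (bpar b.toList)
      then 0 + cnt (fun j => wb a.toList b.toList.length j == bpar b.toList)
          (b.toList.length - b.toList.length) (a.toList.length - b.toList.length) + 1
      else 0 + cnt (fun j => wb a.toList b.toList.length j == bpar b.toList)
          (b.toList.length - b.toList.length) (a.toList.length - b.toList.length))
      = 0 + cnt (fun j => wb a.toList b.toList.length j == bpar b.toList) 0
          (a.toList.length - b.toList.length + 1) := by
    rw [Nat.sub_self, cnt_succ_right, Nat.zero_add]
    by_cases hw : wb a.toList b.toList.length (a.toList.length - b.toList.length) = bpar b.toList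
    · rw [hw]
      simp
    · have hne : ib (wb a.toList b.toList.length (a.toList.length - b.toList.length))
          ≠ ib (bpar b.toList) := by rw [Ne, ib_inj]; exact hw
      rw [if_neg hne, if_neg (by simpa using hw)]
      ring
  rw [hc, Nat.sub_zero]
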